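-- pv_equiv track=rewrite | github.com/QuentinDuval/PythonExperiments | stocks/StockPrices.py | max_left
-- ===== SOURCE A (Python) =====
-- from typing import List
--
-- def max_left(prices: List[int]) -> List[int]:
--     max_profits = [0]
--     min_price = prices[0]
--     for price in prices[1:]:
--         if price < min_price:
--             min_price = price
--         max_profits.append(max(max_profits[-1], price - min_price))
--     return max_profits
-- ===== SOURCE B (Python) =====
-- from typing import List
--
-- def max_left(prices: List[int]) -> List[int]:
--     # staged pipeline: prefix minima, per-day profits, then running maximum
--     m = prices[0]
--     mins = []
--     for p in prices:
--         m = min(m, p)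
--         mins.append(m)
--     profits = [p - mn for p, mn in zip(prices, mins)]
--     res = []
--     best = 0
--     for pr in profits:
--         best = max(best, pr)
--         res.append(best)
--     return res
-- ===== Notes on version B (the rewrite author's own statement) =====
-- stated objective: alternative
-- what changed: Replaces the single fused loop tracking (min_price, last max-profit) with a three-stage pipeline: prefix-minimum list, per-day profit list, and a running cumulative maximum.
import Mathlib
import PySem

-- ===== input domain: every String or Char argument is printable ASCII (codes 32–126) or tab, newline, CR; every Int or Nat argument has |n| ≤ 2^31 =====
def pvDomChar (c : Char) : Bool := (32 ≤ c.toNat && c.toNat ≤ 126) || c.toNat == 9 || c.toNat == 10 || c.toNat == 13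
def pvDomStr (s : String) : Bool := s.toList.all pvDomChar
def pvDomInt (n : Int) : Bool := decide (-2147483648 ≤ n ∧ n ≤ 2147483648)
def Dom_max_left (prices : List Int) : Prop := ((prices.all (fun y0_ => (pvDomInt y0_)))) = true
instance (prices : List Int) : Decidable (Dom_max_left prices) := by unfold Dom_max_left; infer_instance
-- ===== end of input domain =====

-- B replaces A's fused loop with a staged pipeline (prefix minima, profits, cumulative max); return values proved equal on nonempty lists.

-- ===== PORT A =====
-- A's loop: state = (max_profits so far, min_price); appends max(max_profits[-1], price - min_price)
def max_leftLoop (acc : List Int) (minPrice : Int) : List Int → List Int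
  | [] => acc
  | price :: rest =>
      let minPrice' := if price < minPrice then price else minPrice
      max_leftLoop (acc ++ [max (acc.getLastD 0) (price - minPrice')]) minPrice' rest

def max_left (prices : List Int) : List Int :=
  -- prices[0] raises on []; Pre_ excludes the empty list, headI stands in for prices[0]
  max_leftLoop [0] prices.headI prices.tail

-- ===== PORT B =====
def minsAux (m : Int) : List Int → List Int
  | [] => []
  | p :: rest => let m' := min m p; m' :: minsAux m' rest

def cummaxAux (best : Int) : List Int → List Int
  | [] => []
  | pr :: rest => let b' := max best pr; b' :: cummaxAux b' rest

def max_left_alt (prices : List Int) : List Int :=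
  let mins := minsAux prices.headI prices
  let profits := List.zipWith (· - ·) prices mins
  cummaxAux 0 profits

-- ===== PRECONDITION & SPEC =====
-- A (and B) raise IndexError on the empty list (prices[0]); Pre_ excludes exactly that.
def Pre_max_left (prices : List Int) : Prop := prices ≠ []
instance (prices : List Int) : Decidable (Pre_max_left prices) := by unfold Pre_max_left; infer_instance
def pvWitness_max_left : List Int := [3, 1, 4]

def Spec_max_left (prices : List Int) (out : List Int) : Prop := out = max_left_alt prices
instance (prices : List Int) (out : List Int) : Decidable (Spec_max_left prices out) := by unfold Spec_max_left; infer_instance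

-- ===== CLAIM (what is proved, stated in full; the proofs are below) =====
def Claim_equal_max_left : Prop := ∀ (prices : List Int), Dom_max_left prices → Pre_max_left prices → Spec_max_left prices (max_left prices)

-- ===== LEMMAS AND PROOFS =====
theorem max_leftLoop_eq (rest : List Int) :
    ∀ (acc : List Int) (minPrice best : Int), acc.getLastD 0 = best →
    max_leftLoop acc minPrice rest =
      acc ++ cummaxAux best (List.zipWith (· - ·) rest (minsAux minPrice rest)) := by
  induction rest with
  | nil => intro acc minPrice best _; simp [max_leftLoop, minsAux, cummaxAux]
  | cons price rest ih =>
      intro acc minPrice best hlast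
      have hmin : (if price < minPrice then price else minPrice) = min minPrice price := by
        rcases Int.lt_or_le price minPrice with h | h <;> simp [min_def, h] <;> omega
      simp only [max_leftLoop, minsAux, cummaxAux, List.zipWith, hmin, hlast]
      rw [ih (acc ++ [max best (price - min minPrice price)]) (min minPrice price)
            (max best (price - min minPrice price)) (by simp)]
      simp

-- ===== VERDICT (by name: the statement is the Claim_ definition above) =====
theorem max_left_spec : Claim_equal_max_left := by
  intro prices _ hpre
  unfold Spec_max_left max_left max_left_alt
  match prices, hpre with
  | p :: rest, _ =>
      simp only [List.headI, List.tail_cons, minsAux, List.zipWith, min_self]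
      rw [max_leftLoop_eq rest [0] p 0 rfl]
      simp [cummaxAux]
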